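-- pv_equiv track=rewrite | github.com/danielgil/advent-of-code-2023 | src/day4.py | get_scorecards
-- ===== SOURCE A (Python) =====
-- def get_scorecards(current_index, pile):
--     if current_index >= len(pile):
--         return 0
--     wins = len([number for number in pile[current_index]["winning"] if number in pile[current_index]["own"]])
--
--     score = 1
--     for index in range(current_index + 1, current_index + wins + 1):
--         score += get_scorecards(index, pile)
--     return score
-- ===== SOURCE B (Python) =====
-- def get_scorecards(current_index, pile):
--     n = len(pile)
--     if current_index < 0 or current_index >= n:
--         return 0
--     scores = []
--     for card in reversed(pile):
--         own = set(card["own"])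
--         wins = sum(1 for number in card["winning"] if number in own)
--         scores = [1 + sum(scores[:wins])] + scores
--     return scores[current_index]
-- ===== Notes on version B (the rewrite author's own statement) =====
-- stated objective: faster
-- what changed: Replaces A's naive recursion (which re-solves the same card exponentially often) by a single backward tabulation pass that computes each card's score once, with the own-numbers held in a set.
-- intended difference: On in-range negative current_index (-len(pile) <= ci < 0) A wraps the initial card lookup but not the recursive indices, returning a score that mixes wrapped and unwrapped card positions (e.g. 2 on the witness); B returns 0, treating every index outside the pile as scoring nothing, consistent with A's own out-of-range branch. — e.g. on get_scorecards(-1, [[("winning", [1]), ("own", [1])]]): A returns 2, B returns 0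
-- outside the precondition, e.g. on get_scorecards(0, [{'winning': [], 'own': []}, {'x': []}]): A returns 1, B raises KeyError
import Mathlib
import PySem

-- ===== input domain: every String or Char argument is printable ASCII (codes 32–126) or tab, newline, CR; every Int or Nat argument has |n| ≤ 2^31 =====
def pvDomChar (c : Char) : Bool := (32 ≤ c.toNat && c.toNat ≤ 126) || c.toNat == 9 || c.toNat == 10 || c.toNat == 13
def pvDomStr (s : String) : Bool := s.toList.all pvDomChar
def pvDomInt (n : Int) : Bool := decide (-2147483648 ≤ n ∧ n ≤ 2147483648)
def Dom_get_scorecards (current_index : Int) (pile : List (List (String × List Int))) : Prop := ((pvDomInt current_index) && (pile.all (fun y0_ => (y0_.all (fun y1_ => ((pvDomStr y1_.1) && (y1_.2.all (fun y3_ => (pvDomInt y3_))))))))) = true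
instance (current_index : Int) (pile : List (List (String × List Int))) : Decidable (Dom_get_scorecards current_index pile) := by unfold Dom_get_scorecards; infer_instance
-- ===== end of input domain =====

-- B replaces A's naive exponential recursion by one backward tabulation pass (each card's score
-- computed once, own-numbers kept in a set); the RETURN value is proved equal for
-- current_index ≥ 0; on in-range negative current_index (D_) A mixes wrapped and unwrapped
-- indices while B returns 0.

-- ===== PORT A =====
-- wins = len([number for number in pile[current_index]["winning"] if number in pile[current_index]["own"]])
def pvWinsA (card : List (String × List Int)) : Nat :=
  (((PySem.Dict.mk card).getD "winning" []).filter
    (fun number => decide (number ∈ (PySem.Dict.mk card).getD "own" []))).length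

def get_scorecards (current_index : Int) (pile : List (List (String × List Int))) : Int :=
  if _h : (pile.length : Int) ≤ current_index then 0
  else
    -- pile[current_index]: exact when -len ≤ current_index; key lookups exact when present (Pre_)
    (PySem.List.pyRange (current_index + 1)
        (current_index + (pvWinsA (PySem.List.pyGetD pile current_index []) : Int) + 1) 1).attach.foldl
      (fun score x => score + get_scorecards x.1 pile) 1
termination_by ((pile.length : Int) - current_index).toNat
decreasing_by
  have hx := PySem.List.mem_pyRange_one.mp x.2
  omega

-- ===== PORT B =====
-- wins = sum(1 for number in card["winning"] if number in own)   with own = set(card["own"])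
def pvCardWins (card : List (String × List Int)) : Int :=
  ((PySem.Dict.mk card).getD "winning" []).foldl
    (fun acc number =>
      if PySem.Set.contains (PySem.Set.ofList ((PySem.Dict.mk card).getD "own" [])) number
      then acc + 1 else acc) 0

-- scores = [1 + sum(scores[:wins])] + scores
def pvStep (scores : List Int) (card : List (String × List Int)) : List Int :=
  (1 + (PySem.List.slice scores none (some (pvCardWins card))).sum) :: scores

def get_scorecards_alt (current_index : Int) (pile : List (List (String × List Int))) : Int :=
  if current_index < 0 ∨ (pile.length : Int) ≤ current_index then 0
  else PySem.List.pyGetD (pile.reverse.foldl pvStep []) current_index 0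

-- ===== PRECONDITION & SPEC =====
-- Pre_ excludes current_index < -len(pile) (Python A raises IndexError) and, whenever
-- current_index points into the pile, piles with a card missing the "winning" or "own" key:
-- there A raises KeyError on every card it reaches, and B (which tabulates every card) raises
-- on any malformed card; this also excludes some inputs where A never reaches the malformed
-- card and returns (see cites).
def Pre_get_scorecards (current_index : Int) (pile : List (List (String × List Int))) : Prop :=
  -(pile.length : Int) ≤ current_index ∧
  (current_index < (pile.length : Int) →
    ∀ card ∈ pile, (PySem.Dict.mk card).contains "winning" = true ∧
                   (PySem.Dict.mk card).contains "own" = true)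
instance (current_index : Int) (pile : List (List (String × List Int))) : Decidable (Pre_get_scorecards current_index pile) := by unfold Pre_get_scorecards; infer_instance

def pvWitness_get_scorecards : Int × (List (List (String × List Int))) :=
  (0, [[("winning", [1]), ("own", [1, 2])]])

-- On in-range negative current_index (-len ≤ ci < 0) A wraps the initial card lookup but not the
-- recursive indices, returning a score that mixes wrapped and unwrapped card positions; B returns 0,
-- treating every index outside the pile as scoring nothing, consistent with A's out-of-range branch.
def D_get_scorecards (current_index : Int) (pile : List (List (String × List Int))) : Prop :=
  current_index < 0
instance (current_index : Int) (pile : List (List (String × List Int))) : Decidable (D_get_scorecards current_index pile) := by unfold D_get_scorecards; infer_instance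

def Spec_get_scorecards (current_index : Int) (pile : List (List (String × List Int))) (out : Int) : Prop := ¬ D_get_scorecards current_index pile → out = get_scorecards_alt current_index pile
instance (current_index : Int) (pile : List (List (String × List Int))) (out : Int) : Decidable (Spec_get_scorecards current_index pile out) := by unfold Spec_get_scorecards; infer_instance

def pvDiffWitness_get_scorecards : Int × (List (List (String × List Int))) :=
  (-1, [[("winning", [1]), ("own", [1])]])
def pvDiffWitnessOut_get_scorecards : Int × Int := (2, 0)

-- ===== CLAIM (what is proved, stated in full; the proofs are below) =====
def Claim_unchanged_get_scorecards : Prop := ∀ (current_index : Int) (pile : List (List (String × List Int))), Dom_get_scorecards current_index pile → Pre_get_scorecards current_index pile → Spec_get_scorecards current_index pile (get_scorecards current_index pile)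
def Claim_changed_get_scorecards : Prop := Dom_get_scorecards (pvDiffWitness_get_scorecards.1) (pvDiffWitness_get_scorecards.2) ∧ Pre_get_scorecards (pvDiffWitness_get_scorecards.1) (pvDiffWitness_get_scorecards.2) ∧ D_get_scorecards (pvDiffWitness_get_scorecards.1) (pvDiffWitness_get_scorecards.2) ∧ get_scorecards (pvDiffWitness_get_scorecards.1) (pvDiffWitness_get_scorecards.2) = pvDiffWitnessOut_get_scorecards.1 ∧ get_scorecards_alt (pvDiffWitness_get_scorecards.1) (pvDiffWitness_get_scorecards.2) = pvDiffWitnessOut_get_scorecards.2 ∧ pvDiffWitnessOut_get_scorecards.1 ≠ pvDiffWitnessOut_get_scorecards.2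
def Claim_exact_get_scorecards : Prop := ∀ (current_index : Int) (pile : List (List (String × List Int))), Dom_get_scorecards current_index pile → Pre_get_scorecards current_index pile → D_get_scorecards current_index pile → get_scorecards current_index pile ≠ get_scorecards_alt current_index pile

-- ===== LEMMAS AND PROOFS =====

theorem pvA_of_ge (current_index : Int) (pile : List (List (String × List Int)))
    (h : (pile.length : Int) ≤ current_index) : get_scorecards current_index pile = 0 := by
  rw [get_scorecards]; simp [h]

theorem pvA_of_lt (current_index : Int) (pile : List (List (String × List Int)))
    (h : current_index < (pile.length : Int)) :
    get_scorecards current_index pile =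
      1 + ((PySem.List.pyRange (current_index + 1)
              (current_index + (pvWinsA (PySem.List.pyGetD pile current_index []) : Int) + 1) 1).map
            (fun j => get_scorecards j pile)).sum := by
  rw [get_scorecards, dif_neg (by omega)]
  rw [List.foldl_attach (f := fun score j => score + get_scorecards j pile)]
  rw [PySem.List.foldl_add]

theorem pvA_nonneg (current_index : Int) (pile : List (List (String × List Int))) :
    0 ≤ get_scorecards current_index pile := by
  suffices H : ∀ (m : Nat) (ci : Int), ((pile.length : Int) - ci).toNat ≤ m →
      0 ≤ get_scorecards ci pile from H _ current_index le_rfl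
  intro m
  induction m with
  | zero =>
    intro ci h
    rw [pvA_of_ge ci pile (by omega)]
  | succ m ih =>
    intro ci h
    by_cases hge : (pile.length : Int) ≤ ci
    · rw [pvA_of_ge ci pile hge]
    · rw [pvA_of_lt ci pile (by omega)]
      have hs : 0 ≤ ((PySem.List.pyRange (ci + 1)
          (ci + (pvWinsA (PySem.List.pyGetD pile ci []) : Int) + 1) 1).map
          (fun j => get_scorecards j pile)).sum := by
        apply List.sum_nonneg
        intro x hx
        rcases List.mem_map.mp hx with ⟨j, hj, rfl⟩
        have hjb := PySem.List.mem_pyRange_one.mp hj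
        exact ih j (by omega)
      omega

theorem pvA_shift (c : List (String × List Int)) (rest : List (List (String × List Int)))
    (i : Int) (hi : 0 ≤ i) :
    get_scorecards (i + 1) (c :: rest) = get_scorecards i rest := by
  suffices H : ∀ (m : Nat) (i : Int), ((rest.length : Int) - i).toNat ≤ m → 0 ≤ i →
      get_scorecards (i + 1) (c :: rest) = get_scorecards i rest from H _ i le_rfl hi
  intro m
  induction m with
  | zero =>
    intro i h hi
    rw [pvA_of_ge i rest (by omega), pvA_of_ge (i + 1) (c :: rest) (by simp; omega)]
  | succ m ih =>
    intro i h hi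
    by_cases hge : (rest.length : Int) ≤ i
    · rw [pvA_of_ge i rest hge, pvA_of_ge (i + 1) (c :: rest) (by simp; omega)]
    · have hlt : i < (rest.length : Int) := by omega
      rw [pvA_of_lt i rest hlt, pvA_of_lt (i + 1) (c :: rest) (by simp; omega)]
      have hcard : PySem.List.pyGetD (c :: rest) (i + 1) [] = PySem.List.pyGetD rest i [] := by
        rw [PySem.List.pyGetD_eq_getElem _ _ hi hlt,
            PySem.List.pyGetD_eq_getElem _ _ (by omega) (by simp; omega)]
        have ht : (i + 1).toNat = i.toNat + 1 := by omega
        simp [ht]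
      rw [hcard]
      congr 1
      rw [PySem.List.pyRange_one, PySem.List.pyRange_one]
      have hw1 : (i + 1 + (pvWinsA (PySem.List.pyGetD rest i []) : Int) + 1 - (i + 1 + 1)).toNat
          = pvWinsA (PySem.List.pyGetD rest i []) := by omega
      have hw2 : (i + (pvWinsA (PySem.List.pyGetD rest i []) : Int) + 1 - (i + 1)).toNat
          = pvWinsA (PySem.List.pyGetD rest i []) := by omega
      rw [hw1, hw2, List.map_map, List.map_map]
      refine congrArg List.sum (List.map_congr_left ?_)
      intro k hk
      have hk' := List.mem_range.mp hk
      simp only [Function.comp]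
      have he : i + 1 + 1 + (k : Int) = (i + 1 + (k : Int)) + 1 := by ring
      have he2 : i + 1 + (k : Int) = (i + (k : Int)) + 1 := by ring
      rw [he, ih (i + 1 + (k : Int)) (by omega) (by omega), he2]

-- wins computed by B (fold with a set) equals wins computed by A (filter length)
theorem pvWins_eq (card : List (String × List Int)) : pvCardWins card = (pvWinsA card : Int) := by
  unfold pvCardWins pvWinsA
  rw [PySem.List.foldl_count_if, ← List.countP_eq_length_filter]
  simp only [zero_add]
  congr 1
  apply List.countP_congr
  intro x _
  by_cases hx : x ∈ (PySem.Dict.mk card).getD "own" [] <;>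
    simp [PySem.Set.contains, PySem.Set.mem_ofList, hx]

-- summing the first w entries of the score table equals the w-term sum in A's recursion
theorem pvTakeSum (pile : List (List (String × List Int))) (w : Nat) :
    ((List.range w).map (fun j : Nat => get_scorecards (j : Int) pile)).sum
      = (((List.range pile.length).map (fun j : Nat => get_scorecards (j : Int) pile)).take w).sum := by
  induction w with
  | zero => simp
  | succ w ih =>
    rw [List.range_succ, List.map_append, List.sum_append, ih]
    by_cases hw : w < pile.length
    · rw [List.take_add_one, List.sum_append]
      congr 1
      rw [List.getElem?_eq_getElem (by simpa using hw)]
      simp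
    · have hz : get_scorecards (w : Int) pile = 0 := pvA_of_ge _ _ (by omega)
      have hlen : ((List.range pile.length).map
          (fun j : Nat => get_scorecards (j : Int) pile)).length ≤ w := by simp; omega
      rw [List.take_of_length_le hlen, List.take_of_length_le (le_trans hlen (by omega))]
      simp [hz]

-- the backward tabulation builds exactly A's scores, card by card
theorem pvTable (pile : List (List (String × List Int))) :
    pile.foldr (fun card scores => pvStep scores card) []
      = (List.range pile.length).map (fun j : Nat => get_scorecards (j : Int) pile) := by
  induction pile with
  | nil => simp
  | cons c rest ih =>
    rw [List.foldr_cons, ih]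
    unfold pvStep
    rw [List.length_cons, List.range_succ_eq_map, List.map_cons, List.map_map]
    rw [List.cons_eq_cons]
    refine ⟨?_, ?_⟩
    · -- head: 1 + sum(scores[:wins]) = get_scorecards 0 (c :: rest)
      simp only [Nat.cast_zero]
      rw [pvA_of_lt 0 (c :: rest) (by push_cast [List.length_cons]; omega)]
      rw [PySem.List.pyGetD_zero_cons, pvWins_eq, PySem.List.slice_to _ (by omega)]
      have ht : ((pvWinsA c : Int)).toNat = pvWinsA c := by omega
      rw [ht]
      congr 1
      rw [PySem.List.pyRange_one]
      have hw : (0 + (pvWinsA c : Int) + 1 - (0 + 1)).toNat = pvWinsA c := by omega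
      rw [hw, List.map_map, ← pvTakeSum rest (pvWinsA c)]
      refine congrArg List.sum (List.map_congr_left ?_)
      intro k hk
      simp only [Function.comp]
      have he : (0 : Int) + 1 + (k : Int) = (k : Int) + 1 := by ring
      rw [he, pvA_shift c rest (k : Int) (by omega)]
    · -- tail: the suffix table shifts by one card
      symm
      apply List.map_congr_left
      intro k hk
      simp only [Function.comp]
      have he : ((Nat.succ k : Nat) : Int) = (k : Int) + 1 := by push_cast [Nat.succ_eq_add_one]; ring
      rw [he, pvA_shift c rest (k : Int) (by omega)]

-- ===== VERDICT (by name: the statement is the Claim_ definition above) =====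
theorem get_scorecards_spec : Claim_unchanged_get_scorecards := by
  intro current_index pile _hdom _hpre hnD
  have h0 : 0 ≤ current_index := by
    by_contra hneg
    exact hnD (by unfold D_get_scorecards; omega)
  by_cases hge : (pile.length : Int) ≤ current_index
  · rw [pvA_of_ge current_index pile hge]
    unfold get_scorecards_alt
    rw [if_pos (Or.inr hge)]
  · have hlt : current_index < (pile.length : Int) := by omega
    unfold get_scorecards_alt
    rw [if_neg (by omega)]
    rw [List.foldl_reverse, pvTable]
    rw [PySem.List.pyGetD_eq_getElem _ _ h0 (by simpa using hlt)]
    simp only [List.getElem_map, List.getElem_range]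
    rw [Int.toNat_of_nonneg h0]

theorem get_scorecards_changed : Claim_changed_get_scorecards := by
  unfold Claim_changed_get_scorecards
  refine ⟨by decide, by decide, by decide, ?_, by decide, by decide⟩
  -- A(-1, [card]) = 2, computed through the recursion equations
  have hp : pvDiffWitness_get_scorecards.2 = [[("winning", [1]), ("own", [1])]] := rfl
  have h1 : get_scorecards 1 pvDiffWitness_get_scorecards.2 = 0 :=
    pvA_of_ge _ _ (by rw [hp]; simp)
  have h0 : get_scorecards 0 pvDiffWitness_get_scorecards.2 = 1 := by
    rw [pvA_of_lt 0 _ (by rw [hp]; simp)]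
    have hw : pvWinsA (PySem.List.pyGetD pvDiffWitness_get_scorecards.2 0 []) = 1 := by decide
    rw [hw]
    have hr : PySem.List.pyRange (0 + 1) (0 + ((1 : Nat) : Int) + 1) 1 = [1] := by decide
    rw [hr, List.map_singleton, List.sum_singleton, h1]
    norm_num
  have hm : get_scorecards (-1) pvDiffWitness_get_scorecards.2 = 2 := by
    rw [pvA_of_lt (-1) _ (by rw [hp]; simp)]
    have hw : pvWinsA (PySem.List.pyGetD pvDiffWitness_get_scorecards.2 (-1) []) = 1 := by decide
    rw [hw]
    have hr : PySem.List.pyRange (-1 + 1) (-1 + ((1 : Nat) : Int) + 1) 1 = [0] := by decide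
    rw [hr, List.map_singleton, List.sum_singleton, h0]
    norm_num
  exact hm

theorem get_scorecards_tight : Claim_exact_get_scorecards := by
  intro current_index pile _hdom hpre hD
  have hneg : current_index < 0 := hD
  have hlt : current_index < (pile.length : Int) := by
    have := hpre.1
    omega
  have hB : get_scorecards_alt current_index pile = 0 := by
    unfold get_scorecards_alt
    rw [if_pos (Or.inl hneg)]
  rw [hB, pvA_of_lt current_index pile hlt]
  have hs : 0 ≤ ((PySem.List.pyRange (current_index + 1)
      (current_index + (pvWinsA (PySem.List.pyGetD pile current_index []) : Int) + 1) 1).map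
      (fun j => get_scorecards j pile)).sum := by
    apply List.sum_nonneg
    intro x hx
    rcases List.mem_map.mp hx with ⟨j, _, rfl⟩
    exact pvA_nonneg j pile
  omega
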